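-- pv_equiv track=rewrite | github.com/softwaresafer/VeriBuild | src/Util/operation.py | CDDG_constructor
-- ===== SOURCE A (Python) =====
-- def CDDG_constructor(CDG, DDG, fileIndexMap):
--     CDDG = {}
--     for target in CDG.keys():
--         inputfiles, outputfiles, createfiles, deletefiles = get_CDDG_item(target, CDG, DDG, fileIndexMap)
--         CDDG[target] = {}
--         CDDG[target]["input"] = inputfiles
--         CDDG[target]["output"] = outputfiles
--         CDDG[target]["create"] = createfiles
--         CDDG[target]["delete"] = deletefiles
--     return CDDG
--
-- def merge_deletefiles(deletefiles, subinputfiles, suboutputfiles, subcreatefiles, subdeletefiles, targetIOInfo):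
--     for subdeletefile in subdeletefiles.keys():
--         if (subdeletefile in suboutputfiles.keys()):
--             if (suboutputfiles[subdeletefile] > subdeletefiles[subdeletefile]):
--                 continue
--         elif (subdeletefile in deletefiles.keys()):
--             if (subdeletefiles[subdeletefile] < deletefiles[subdeletefile]):
--                 continue
--         deletefiles[subdeletefile] = subdeletefiles[subdeletefile]
--     deletefiles.update(targetIOInfo["delete"])
--     for suboutputfile in targetIOInfo["output"].keys():
--         if (suboutputfile in deletefiles.keys()):
--             if (targetIOInfo["output"][suboutputfile] > deletefiles[suboutputfile]):
--                 deletefiles.pop(suboutputfile)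
--     return deletefiles
--
-- def merge_outputfiles(outputfiles, subinputfiles, suboutputfiles, subcreatefiles, subdeletefiles, targetIOInfo):
--     for suboutputfile in suboutputfiles.keys():
--         if suboutputfile in subdeletefiles.keys():
--             if subdeletefiles[suboutputfile] > suboutputfiles[suboutputfile]:
--                 continue
--         elif suboutputfile in outputfiles.keys() and suboutputfiles[suboutputfile] is not None and outputfiles[suboutputfile] is not None:
--             if suboutputfiles[suboutputfile] < outputfiles[suboutputfile]:
--                 continue
--         outputfiles[suboutputfile] = suboutputfiles[suboutputfile]
--     outputfiles.update(targetIOInfo["output"])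
--     for subdeletefile in targetIOInfo["delete"].keys():
--         if (subdeletefile in outputfiles.keys()):
--             if (targetIOInfo["delete"][subdeletefile] > outputfiles[subdeletefile]):
--                 outputfiles.pop(subdeletefile)
--     return outputfiles
--
-- def merge_createfiles(createfiles, subinputfiles, suboutputfiles, subcreatefiles, subdeletefiles, targetIOInfo):
--     for subcreatefile in subcreatefiles.keys():
--         if (subcreatefile in subdeletefiles.keys()):
--             if (subdeletefiles[subcreatefile] > subcreatefiles[subcreatefile]):
--                 continue
--         elif (subcreatefile in createfiles.keys()):
--             if (subcreatefiles[subcreatefile] < createfiles[subcreatefile]):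
--                 continue
--         createfiles[subcreatefile] = subcreatefiles[subcreatefile]
--     createfiles.update(targetIOInfo["create"])
--     for subdeletefile in targetIOInfo["delete"].keys():
--         if (subdeletefile in createfiles.keys()):
--             if (targetIOInfo["delete"][subdeletefile] > createfiles[subdeletefile]):
--                 createfiles.pop(subdeletefile)
--     return createfiles
--
-- def get_CDDG_item(target, CDG, DDG, fileIndexMap):
--     inputfiles = {}
--     outputfiles = {}
--     createfiles = {}
--     deletefiles = {}
--     if (CDG[target] == []):
--         if (target in fileIndexMap.keys()):
--             inputfiles = {fileIndexMap[target]: None}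
--     elif (target in DDG.keys()):
--         prerequisite_list = CDG[target]
--         inputfiles.update(DDG[target]["input"])
--         for subtarget in prerequisite_list:
--             subinputfiles, suboutputfiles, subcreatefiles, subdeletefiles = get_CDDG_item(subtarget, CDG, DDG, fileIndexMap)
--             inputfiles.update(subinputfiles)
--             outputfiles = merge_outputfiles(outputfiles, subinputfiles, suboutputfiles, subcreatefiles, subdeletefiles, DDG[target])
--             createfiles = merge_createfiles(createfiles, subinputfiles, suboutputfiles, subcreatefiles, subdeletefiles, DDG[target])
--             deletefiles = merge_deletefiles(deletefiles, subinputfiles, suboutputfiles, subcreatefiles, subdeletefiles, DDG[target])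
--     return inputfiles, outputfiles, createfiles, deletefiles
-- ===== SOURCE B (Python) =====
-- # B: memoized recursive descent (top-down DP over the DAG: each target's item is
-- # computed once) with one generic merge routine instead of A's three near-identical ones.
--
-- def _merge(acc, sub, shadow, tmain, tdel, guard):
--     # Generic body of A's merge_{output,create,delete}files: fold `sub` into `acc`
--     # (a larger `shadow` entry suppresses the copy), overlay `tmain`, then drop the
--     # keys `tdel` out-dates.  `guard` is the None-guard the output variant carries.
--     for k, v in sub.items():
--         if k in shadow:
--             if shadow[k] > v:
--                 continue
--         elif k in acc and (not guard or (v is not None and acc[k] is not None)):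
--             if v < acc[k]:
--                 continue
--         acc[k] = v
--     acc.update(tmain)
--     for k, dv in tdel.items():
--         if k in acc and dv > acc[k]:
--             acc.pop(k)
--     return acc
--
-- def _get(target, CDG, DDG, fileIndexMap, memo):
--     if target in memo:
--         return memo[target]
--     prereqs = CDG[target]
--     if prereqs == []:
--         if target in fileIndexMap:
--             item = ({fileIndexMap[target]: None}, {}, {}, {})
--         else:
--             item = ({}, {}, {}, {})
--     elif target not in DDG:
--         item = ({}, {}, {}, {})
--     else:
--         info = DDG[target]
--         inputs = dict(info["input"])
--         outs, creates, dels = {}, {}, {}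
--         for s in prereqs:
--             si, so, sc, sd = _get(s, CDG, DDG, fileIndexMap, memo)
--             inputs.update(si)
--             outs = _merge(outs, so, sd, info["output"], info["delete"], True)
--             creates = _merge(creates, sc, sd, info["create"], info["delete"], False)
--             dels = _merge(dels, sd, so, info["delete"], info["output"], False)
--         item = (inputs, outs, creates, dels)
--     memo[target] = item
--     return item
--
-- def CDDG_constructor(CDG, DDG, fileIndexMap):
--     memo = {}
--     CDDG = {}
--     for target in CDG:
--         i, o, c, d = _get(target, CDG, DDG, fileIndexMap, memo)
--         CDDG[target] = {"input": i, "output": o, "create": c, "delete": d}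
--     return CDDG
-- ===== Notes on version B (the rewrite author's own statement) =====
-- stated objective: faster
-- what changed: B memoizes get_CDDG_item per target (top-down dynamic programming over the DAG: each target's item is computed once and reused, where A recomputes a shared subtarget once per path) and collapses A's three near-identical merge_{output,create,delete}files into one generic merge routine with a guard flag.
import Mathlib
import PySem

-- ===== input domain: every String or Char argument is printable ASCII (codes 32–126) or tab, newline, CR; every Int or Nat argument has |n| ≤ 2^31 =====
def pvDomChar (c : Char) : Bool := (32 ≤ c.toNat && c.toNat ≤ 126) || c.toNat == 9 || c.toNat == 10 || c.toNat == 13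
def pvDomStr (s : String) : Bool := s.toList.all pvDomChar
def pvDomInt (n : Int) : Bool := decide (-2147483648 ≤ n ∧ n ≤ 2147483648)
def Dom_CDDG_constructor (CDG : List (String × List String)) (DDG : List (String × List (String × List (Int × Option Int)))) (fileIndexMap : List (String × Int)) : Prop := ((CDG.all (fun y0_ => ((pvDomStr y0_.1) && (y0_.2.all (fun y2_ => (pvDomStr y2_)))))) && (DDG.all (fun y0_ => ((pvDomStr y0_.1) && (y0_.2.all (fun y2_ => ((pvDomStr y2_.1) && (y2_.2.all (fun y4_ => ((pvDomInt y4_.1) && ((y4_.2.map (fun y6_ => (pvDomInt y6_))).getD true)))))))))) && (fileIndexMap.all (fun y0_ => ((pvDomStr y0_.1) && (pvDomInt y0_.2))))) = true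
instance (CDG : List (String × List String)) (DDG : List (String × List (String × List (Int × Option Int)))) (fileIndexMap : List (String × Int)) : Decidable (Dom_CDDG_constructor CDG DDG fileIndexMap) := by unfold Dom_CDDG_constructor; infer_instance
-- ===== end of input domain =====

-- B memoizes get_CDDG_item per target (each item computed once instead of once per DAG
-- path) and uses one generic merge routine instead of A's three near-identical ones.
-- Return values only.

abbrev pvFD := PySem.Dict Int (Option Int)
abbrev pvInfo := List (String × List (Int × Option Int))
abbrev pvItem := pvFD × pvFD × pvFD × pvFD
abbrev pvOut := List (String × List (String × List (Int × Option Int)))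

-- Python compares file indices with >/<; on a None operand Python raises TypeError.
-- Pre_ excludes the inputs carrying such a None, so the `false` returned here on a
-- None operand is never reached on admitted inputs.
def pvGtO : Option Int → Option Int → Bool
  | some x, some y => decide (x > y)
  | _, _ => false
def pvLtO : Option Int → Option Int → Bool
  | some x, some y => decide (x < y)
  | _, _ => false

-- targetIOInfo[k]; Python raises KeyError when k is absent — Pre_ guarantees presence.
def pvTget (info : pvInfo) (k : String) : List (Int × Option Int) :=
  (PySem.Dict.mk info).getD k []

-- ===== PORT A =====
-- Loops 'for k in d.keys(): … d[k] …' over an (unmodified) dict are ported as folds over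
-- its item pairs, using the paired value for d[k] (exact: Pre_ gives unique keys).
def mergeDeletefiles (deletefiles : pvFD) (subinputfiles suboutputfiles subcreatefiles subdeletefiles : pvFD) (targetIOInfo : pvInfo) : pvFD :=
  let d1 := subdeletefiles.items.foldl (fun acc kv =>
    if suboutputfiles.contains kv.1 then
      if pvGtO (suboutputfiles.getD kv.1 none) kv.2 then acc else acc.insert kv.1 kv.2
    else if acc.contains kv.1 then
      if pvLtO kv.2 (acc.getD kv.1 none) then acc else acc.insert kv.1 kv.2
    else acc.insert kv.1 kv.2) deletefiles
  let d2 := d1.update (pvTget targetIOInfo "delete")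
  (pvTget targetIOInfo "output").foldl (fun acc kv =>
    if acc.contains kv.1 then
      if pvGtO kv.2 (acc.getD kv.1 none) then acc.erase kv.1 else acc
    else acc) d2

def mergeOutputfiles (outputfiles : pvFD) (subinputfiles suboutputfiles subcreatefiles subdeletefiles : pvFD) (targetIOInfo : pvInfo) : pvFD :=
  let d1 := suboutputfiles.items.foldl (fun acc kv =>
    if subdeletefiles.contains kv.1 then
      if pvGtO (subdeletefiles.getD kv.1 none) kv.2 then acc else acc.insert kv.1 kv.2
    else if acc.contains kv.1 && kv.2.isSome && (acc.getD kv.1 none).isSome then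
      if pvLtO kv.2 (acc.getD kv.1 none) then acc else acc.insert kv.1 kv.2
    else acc.insert kv.1 kv.2) outputfiles
  let d2 := d1.update (pvTget targetIOInfo "output")
  (pvTget targetIOInfo "delete").foldl (fun acc kv =>
    if acc.contains kv.1 then
      if pvGtO kv.2 (acc.getD kv.1 none) then acc.erase kv.1 else acc
    else acc) d2

def mergeCreatefiles (createfiles : pvFD) (subinputfiles suboutputfiles subcreatefiles subdeletefiles : pvFD) (targetIOInfo : pvInfo) : pvFD :=
  let d1 := subcreatefiles.items.foldl (fun acc kv =>
    if subdeletefiles.contains kv.1 then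
      if pvGtO (subdeletefiles.getD kv.1 none) kv.2 then acc else acc.insert kv.1 kv.2
    else if acc.contains kv.1 then
      if pvLtO kv.2 (acc.getD kv.1 none) then acc else acc.insert kv.1 kv.2
    else acc.insert kv.1 kv.2) createfiles
  let d2 := d1.update (pvTget targetIOInfo "create")
  (pvTget targetIOInfo "delete").foldl (fun acc kv =>
    if acc.contains kv.1 then
      if pvGtO kv.2 (acc.getD kv.1 none) then acc.erase kv.1 else acc
    else acc) d2

-- get_CDDG_item with a fuel parameter; the top level passes CDG.length + 1, which
-- Pre_'s acyclicity clause makes sufficient, so fuel 0 is never reached on admitted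
-- inputs.  CDG[target] (KeyError when absent, excluded by Pre_) is ported as getD [].
def getCDDGItem (fuel : Nat) (target : String) (CDG : List (String × List String)) (DDG : List (String × List (String × List (Int × Option Int)))) (fileIndexMap : List (String × Int)) : pvItem :=
  match fuel with
  | 0 => (.empty, .empty, .empty, .empty)
  | fuel + 1 =>
    let prereqs := (PySem.Dict.mk CDG).getD target []
    if prereqs = [] then
      match (PySem.Dict.mk fileIndexMap).get? target with
      | some i => (PySem.Dict.mk [(i, none)], .empty, .empty, .empty)
      | none => (.empty, .empty, .empty, .empty)
    else
      match (PySem.Dict.mk DDG).get? target with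
      | none => (.empty, .empty, .empty, .empty)
      | some info =>
        let inputfiles0 : pvFD := (PySem.Dict.empty).update (pvTget info "input")
        prereqs.foldl (fun st s =>
          let sub := getCDDGItem fuel s CDG DDG fileIndexMap
          (st.1.update sub.1.items,
           mergeOutputfiles st.2.1 sub.1 sub.2.1 sub.2.2.1 sub.2.2.2 info,
           mergeCreatefiles st.2.2.1 sub.1 sub.2.1 sub.2.2.1 sub.2.2.2 info,
           mergeDeletefiles st.2.2.2 sub.1 sub.2.1 sub.2.2.1 sub.2.2.2 info))
          (inputfiles0, .empty, .empty, .empty)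

def pvRow (it : pvItem) : List (String × List (Int × Option Int)) :=
  [("input", it.1.items), ("output", it.2.1.items), ("create", it.2.2.1.items), ("delete", it.2.2.2.items)]

def CDDG_constructor (CDG : List (String × List String)) (DDG : List (String × List (String × List (Int × Option Int)))) (fileIndexMap : List (String × Int)) : List (String × List (String × List (Int × Option Int))) :=
  CDG.foldl (fun acc entry =>
    acc ++ [(entry.1, pvRow (getCDDGItem (CDG.length + 1) entry.1 CDG DDG fileIndexMap))]) []

-- ===== PORT B =====
-- one generic merge (Source B's _merge): fold sub into acc (shadow's larger entry
-- suppresses the copy), overlay tmain, then drop the keys tdel out-dates; `guard`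
-- is the None-guard the output variant of A carries.
def bMerge (guard : Bool) (acc0 sub shadow : pvFD) (tmain tdel : List (Int × Option Int)) : pvFD :=
  let a1 := sub.items.foldl (fun a kv =>
    if shadow.contains kv.1 then
      if pvGtO (shadow.getD kv.1 none) kv.2 then a else a.insert kv.1 kv.2
    else if a.contains kv.1 && (!guard || (kv.2.isSome && (a.getD kv.1 none).isSome)) then
      if pvLtO kv.2 (a.getD kv.1 none) then a else a.insert kv.1 kv.2
    else a.insert kv.1 kv.2) acc0
  let a2 := a1.update tmain
  tdel.foldl (fun a kv =>
    if a.contains kv.1 then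
      if pvGtO kv.2 (a.getD kv.1 none) then a.erase kv.1 else a
    else a) a2

-- Source B's _get: memoized recursion; returns (item, updated memo).  Same fuel discipline
-- as the A port (fuel 0 unreachable on admitted inputs).
def bGet (CDG : List (String × List String)) (DDG : List (String × List (String × List (Int × Option Int)))) (fileIndexMap : List (String × Int)) : Nat → String → PySem.Dict String pvItem → pvItem × PySem.Dict String pvItem
  | 0, _, memo => ((.empty, .empty, .empty, .empty), memo)
  | fuel + 1, target, memo =>
    match memo.get? target with
    | some it => (it, memo)
    | none =>
      let prereqs := (PySem.Dict.mk CDG).getD target []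
      let r : pvItem × PySem.Dict String pvItem :=
        if prereqs = [] then
          (match (PySem.Dict.mk fileIndexMap).get? target with
           | some i => (PySem.Dict.mk [(i, none)], .empty, .empty, .empty)
           | none => (.empty, .empty, .empty, .empty), memo)
        else
          match (PySem.Dict.mk DDG).get? target with
          | none => ((.empty, .empty, .empty, .empty), memo)
          | some info =>
            prereqs.foldl (fun st s =>
              let q := bGet CDG DDG fileIndexMap fuel s st.2
              ((st.1.1.update q.1.1.items,
                bMerge true st.1.2.1 q.1.2.1 q.1.2.2.2 (pvTget info "output") (pvTget info "delete"),
                bMerge false st.1.2.2.1 q.1.2.2.1 q.1.2.2.2 (pvTget info "create") (pvTget info "delete"),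
                bMerge false st.1.2.2.2 q.1.2.2.2 q.1.2.1 (pvTget info "delete") (pvTget info "output")), q.2))
              (((PySem.Dict.empty).update (pvTget info "input"), .empty, .empty, .empty), memo)
      (r.1, r.2.insert target r.1)

def CDDG_constructor_alt (CDG : List (String × List String)) (DDG : List (String × List (String × List (Int × Option Int)))) (fileIndexMap : List (String × Int)) : List (String × List (String × List (Int × Option Int))) :=
  (CDG.foldl (fun (p : PySem.Dict String pvItem × pvOut) entry =>
    let r := bGet CDG DDG fileIndexMap (CDG.length + 1) entry.1 p.1
    (r.2, p.2 ++ [(entry.1, pvRow r.1)]))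
    (.empty, [])).2

-- ===== PRECONDITION & SPEC =====
-- has the four IO keys Python indexes (KeyError otherwise)
def pvHas4 (info : pvInfo) : Bool :=
  (PySem.Dict.mk info).contains "input" && (PySem.Dict.mk info).contains "output" &&
  (PySem.Dict.mk info).contains "create" && (PySem.Dict.mk info).contains "delete"

-- a target A's recursion expands (nonempty prerequisites and DDG data present)
def pvExp (CDG : List (String × List String)) (DDG : List (String × List (String × List (Int × Option Int)))) (t : String) : Bool :=
  !((PySem.Dict.mk CDG).getD t []).isEmpty && (PySem.Dict.mk DDG).contains t

-- one step of the prerequisite graph: all prerequisites of the expandable targets of S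
def pvNext (CDG : List (String × List String)) (DDG : List (String × List (String × List (Int × Option Int)))) (S : List String) : List String :=
  (S.filter (pvExp CDG DDG)).flatMap (fun t => (PySem.Dict.mk CDG).getD t [])

def pvAllSome (l : List (Int × Option Int)) : Bool := l.all (fun kv => kv.2.isSome)

-- Pre_ excludes exactly inputs on which A raises (B raises there too) plus two
-- conservative corners, each with a cite: (a) assoc lists with duplicate keys (not
-- genuine Python dicts); (b) a missing prerequisite, a used DDG entry missing one of
-- its four IO keys (KeyError); (c) a cyclic prerequisite graph — stated as: iterating
-- the one-step prerequisite-successor map, iterated |CDG|+1 times from the targets,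
-- empties out, i.e. the graph A recurses over has no long path (A/B otherwise recurse forever:
-- RecursionError); (d) a None file index in a used DDG output/create/delete annotation
-- unless no used entry has create/delete data at all — A raises TypeError when such a
-- None is compared; whether it is compared depends on key collisions, so this clause
-- is conservative: it also excludes some inputs where the None is never compared and
-- A returns (see the cite; B returns the same value there).
def Pre_CDDG_constructor (CDG : List (String × List String)) (DDG : List (String × List (String × List (Int × Option Int)))) (fileIndexMap : List (String × Int)) : Prop :=
  (CDG.map Prod.fst).Nodup ∧ (DDG.map Prod.fst).Nodup ∧ (fileIndexMap.map Prod.fst).Nodup ∧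
  (∀ p ∈ DDG, (p.2.map Prod.fst).Nodup ∧ ∀ q ∈ p.2, (q.2.map Prod.fst).Nodup) ∧
  (∀ p ∈ CDG, p.2 ≠ [] → ∀ info, (PySem.Dict.mk DDG).get? p.1 = some info →
    pvHas4 info = true ∧ ∀ s ∈ p.2, (PySem.Dict.mk CDG).contains s = true) ∧
  (pvNext CDG DDG)^[CDG.length + 1] (CDG.map Prod.fst) = [] ∧
  ((∀ p ∈ CDG, p.2 ≠ [] → ∀ info, (PySem.Dict.mk DDG).get? p.1 = some info →
      pvTget info "create" = [] ∧ pvTget info "delete" = []) ∨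
   (∀ p ∈ CDG, p.2 ≠ [] → ∀ info, (PySem.Dict.mk DDG).get? p.1 = some info →
      pvAllSome (pvTget info "output") ∧ pvAllSome (pvTget info "create") ∧ pvAllSome (pvTget info "delete")))

instance (CDG : List (String × List String)) (DDG : List (String × List (String × List (Int × Option Int)))) (fileIndexMap : List (String × Int)) : Decidable (Pre_CDDG_constructor CDG DDG fileIndexMap) := by unfold Pre_CDDG_constructor; infer_instance

def pvWitness_CDDG_constructor : (List (String × List String)) × (List (String × List (String × List (Int × Option Int)))) × (List (String × Int)) :=
  ([("b", []), ("a", ["b"])],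
   [("a", [("input", [(5, none)]), ("output", [(1, some 2)]), ("create", []), ("delete", [(1, some 0)])])],
   [("b", 3)])

def Spec_CDDG_constructor (CDG : List (String × List String)) (DDG : List (String × List (String × List (Int × Option Int)))) (fileIndexMap : List (String × Int)) (out : List (String × List (String × List (Int × Option Int)))) : Prop := out = CDDG_constructor_alt CDG DDG fileIndexMap
def pvDecOut : DecidableEq (List (String × List (String × List (Int × Option Int)))) :=
  @instDecidableEqList _ (@instDecidableEqProd _ _ _ (@instDecidableEqList _ (@instDecidableEqProd _ _ _ (@instDecidableEqList _ (@instDecidableEqProd _ _ _ (fun a b => by infer_instance))))))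
instance (CDG : List (String × List String)) (DDG : List (String × List (String × List (Int × Option Int)))) (fileIndexMap : List (String × Int)) (out : List (String × List (String × List (Int × Option Int)))) : Decidable (Spec_CDDG_constructor CDG DDG fileIndexMap out) := by unfold Spec_CDDG_constructor; exact pvDecOut _ _

-- ===== CLAIM (what is proved, stated in full; the proofs are below) =====
def Claim_equal_CDDG_constructor : Prop := ∀ (CDG : List (String × List String)) (DDG : List (String × List (String × List (Int × Option Int)))) (fileIndexMap : List (String × Int)), Dom_CDDG_constructor CDG DDG fileIndexMap → Pre_CDDG_constructor CDG DDG fileIndexMap → Spec_CDDG_constructor CDG DDG fileIndexMap (CDDG_constructor CDG DDG fileIndexMap)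

-- ===== LEMMAS AND PROOFS =====

theorem pre_witness : Dom_CDDG_constructor pvWitness_CDDG_constructor.1 pvWitness_CDDG_constructor.2.1 pvWitness_CDDG_constructor.2.2 ∧ Pre_CDDG_constructor pvWitness_CDDG_constructor.1 pvWitness_CDDG_constructor.2.1 pvWitness_CDDG_constructor.2.2 := by
  constructor <;> decide


-- the three A-merges are instances of the generic B-merge (the guard flag recovers
-- exactly the None-guard A's output variant carries)
theorem merge_output_eq (acc si so sc sd : pvFD) (info : pvInfo) :
    mergeOutputfiles acc si so sc sd info = bMerge true acc so sd (pvTget info "output") (pvTget info "delete") := by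
  simp only [mergeOutputfiles, bMerge, Bool.not_true, Bool.false_or, Bool.and_assoc]

theorem merge_create_eq (acc si so sc sd : pvFD) (info : pvInfo) :
    mergeCreatefiles acc si so sc sd info = bMerge false acc sc sd (pvTget info "create") (pvTget info "delete") := by
  simp only [mergeCreatefiles, bMerge, Bool.not_false, Bool.true_or, Bool.and_true]

theorem merge_delete_eq (acc si so sc sd : pvFD) (info : pvInfo) :
    mergeDeletefiles acc si so sc sd info = bMerge false acc sd so (pvTget info "delete") (pvTget info "output") := by
  simp only [mergeDeletefiles, bMerge, Bool.not_false, Bool.true_or, Bool.and_true]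

theorem mem_pvNext {CDG : List (String × List String)} {DDG : List (String × List (String × List (Int × Option Int)))} {S : List String} {t : String} (ht : t ∈ S)
    (hpre : (PySem.Dict.mk CDG).getD t [] ≠ [])
    (hddg : (PySem.Dict.mk DDG).contains t = true)
    {s : String} (hs : s ∈ (PySem.Dict.mk CDG).getD t []) : s ∈ pvNext CDG DDG S := by
  unfold pvNext
  refine List.mem_flatMap.mpr ⟨t, List.mem_filter.mpr ⟨ht, ?_⟩, hs⟩
  unfold pvExp
  simp [hddg, hpre]

-- fuel invariance: once the prerequisite graph empties out in k steps, any fuel ≥ k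
-- computes the same item
theorem fuel_inv (CDG : List (String × List String)) (DDG : List (String × List (String × List (Int × Option Int)))) (fIM : List (String × Int)) :
    ∀ (k : Nat) (S : List String), (pvNext CDG DDG)^[k] S = [] →
    ∀ t ∈ S, ∀ f f', k ≤ f → k ≤ f' →
      getCDDGItem f t CDG DDG fIM = getCDDGItem f' t CDG DDG fIM := by
  intro k
  induction k with
  | zero => intro S hS t ht; rw [Function.iterate_zero_apply] at hS; subst hS; simp at ht
  | succ k ih =>
    intro S hS t ht f f' hf hf'
    obtain ⟨a, rfl⟩ : ∃ a, f = a + 1 := ⟨f - 1, by omega⟩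
    obtain ⟨b, rfl⟩ : ∃ b, f' = b + 1 := ⟨f' - 1, by omega⟩
    rw [Function.iterate_succ_apply] at hS
    simp only [getCDDGItem]
    by_cases hpre : (PySem.Dict.mk CDG).getD t [] = []
    · simp [hpre]
    · simp only [hpre, if_false]
      cases hdd : (PySem.Dict.mk DDG).get? t with
      | none => rfl
      | some info =>
        apply PySem.List.foldl_congr_mem
        intro acc s hs
        have hcont : (PySem.Dict.mk DDG).contains t = true := by
          rw [PySem.Dict.contains_eq_isSome_get?, hdd]; rfl
        rw [ih (pvNext CDG DDG S) hS s (mem_pvNext ht hpre hcont hs) a b (by omega) (by omega)]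

-- B's memo invariant: every stored item is the A-item of its target
def pvInv (CDG : List (String × List String)) (DDG : List (String × List (String × List (Int × Option Int)))) (fIM : List (String × Int)) (memo : PySem.Dict String pvItem) : Prop :=
  ∀ s it, memo.get? s = some it → it = getCDDGItem (CDG.length + 1) s CDG DDG fIM

theorem pvInv_insert {CDG : List (String × List String)} {DDG : List (String × List (String × List (Int × Option Int)))} {fIM : List (String × Int)} {memo : PySem.Dict String pvItem}
    (hm : pvInv CDG DDG fIM memo) {t : String} {v : pvItem}
    (hv : v = getCDDGItem (CDG.length + 1) t CDG DDG fIM) :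
    pvInv CDG DDG fIM (memo.insert t v) := by
  intro s it hg
  by_cases hst : s = t
  · subst hst
    rw [PySem.Dict.get?_insert_self] at hg
    cases hg; exact hv
  · rw [PySem.Dict.get?_insert_of_ne _ _ hst] at hg
    exact hm s it hg

theorem pvInv_empty (CDG : List (String × List String)) (DDG : List (String × List (String × List (Int × Option Int)))) (fIM : List (String × Int)) :
    pvInv CDG DDG fIM PySem.Dict.empty := by
  intro s it hg
  simp [PySem.Dict.get?_empty] at hg

-- the threaded fold of B computes A's fold, preserving the memo invariant
theorem bfold_aux (CDG : List (String × List String)) (DDG : List (String × List (String × List (Int × Option Int)))) (fIM : List (String × Int)) (info : pvInfo) (f : Nat) :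
    ∀ (l : List String),
    (∀ s ∈ l, ∀ memo, pvInv CDG DDG fIM memo →
      (bGet CDG DDG fIM f s memo).1 = getCDDGItem (CDG.length + 1) s CDG DDG fIM ∧
      pvInv CDG DDG fIM (bGet CDG DDG fIM f s memo).2) →
    ∀ (q : pvItem) (memo : PySem.Dict String pvItem), pvInv CDG DDG fIM memo →
    (l.foldl (fun st s =>
        let qq := bGet CDG DDG fIM f s st.2
        ((st.1.1.update qq.1.1.items,
          bMerge true st.1.2.1 qq.1.2.1 qq.1.2.2.2 (pvTget info "output") (pvTget info "delete"),
          bMerge false st.1.2.2.1 qq.1.2.2.1 qq.1.2.2.2 (pvTget info "create") (pvTget info "delete"),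
          bMerge false st.1.2.2.2 qq.1.2.2.2 qq.1.2.1 (pvTget info "delete") (pvTget info "output")), qq.2))
      (q, memo)).1
      = l.foldl (fun st s =>
          let sub := getCDDGItem (CDG.length + 1) s CDG DDG fIM
          (st.1.update sub.1.items,
           mergeOutputfiles st.2.1 sub.1 sub.2.1 sub.2.2.1 sub.2.2.2 info,
           mergeCreatefiles st.2.2.1 sub.1 sub.2.1 sub.2.2.1 sub.2.2.2 info,
           mergeDeletefiles st.2.2.2 sub.1 sub.2.1 sub.2.2.1 sub.2.2.2 info)) q
    ∧ pvInv CDG DDG fIM ((l.foldl (fun st s =>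
        let qq := bGet CDG DDG fIM f s st.2
        ((st.1.1.update qq.1.1.items,
          bMerge true st.1.2.1 qq.1.2.1 qq.1.2.2.2 (pvTget info "output") (pvTget info "delete"),
          bMerge false st.1.2.2.1 qq.1.2.2.1 qq.1.2.2.2 (pvTget info "create") (pvTget info "delete"),
          bMerge false st.1.2.2.2 qq.1.2.2.2 qq.1.2.1 (pvTget info "delete") (pvTget info "output")), qq.2))
      (q, memo)).2) := by
  intro l
  induction l with
  | nil => intro _ q memo hm; exact ⟨rfl, hm⟩
  | cons s l' ih =>
    intro hstep q memo hm
    obtain ⟨h1, h2⟩ := hstep s (by simp) memo hm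
    simp only [List.foldl_cons]
    show _ ∧ _
    rw [h1, merge_output_eq, merge_create_eq, merge_delete_eq]
    exact ih (fun x hx => hstep x (List.mem_cons_of_mem _ hx)) _ _ h2

-- B's memoized recursion computes exactly A's item, preserving the invariant
theorem bGet_eq (CDG : List (String × List String)) (DDG : List (String × List (String × List (Int × Option Int)))) (fIM : List (String × Int)) :
    ∀ (k : Nat), k ≤ CDG.length + 1 → ∀ (S : List String), (pvNext CDG DDG)^[k] S = [] →
    ∀ t ∈ S, ∀ f, k ≤ f → ∀ memo, pvInv CDG DDG fIM memo →
    (bGet CDG DDG fIM f t memo).1 = getCDDGItem (CDG.length + 1) t CDG DDG fIM ∧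
    pvInv CDG DDG fIM (bGet CDG DDG fIM f t memo).2 := by
  intro k
  induction k with
  | zero => intro _ S hS t ht; rw [Function.iterate_zero_apply] at hS; subst hS; simp at ht
  | succ k ih =>
    intro hkN S hS t ht f hf memo hm
    obtain ⟨a, rfl⟩ : ∃ a, f = a + 1 := ⟨f - 1, by omega⟩
    rw [Function.iterate_succ_apply] at hS
    simp only [bGet]
    cases hg : memo.get? t with
    | some it => exact ⟨hm t it hg, hm⟩
    | none =>
      simp only []
      by_cases hpre : (PySem.Dict.mk CDG).getD t [] = []
      · have hA : getCDDGItem (CDG.length + 1) t CDG DDG fIM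
            = (match (PySem.Dict.mk fIM).get? t with
               | some i => ((PySem.Dict.mk [(i, none)] : pvFD), (.empty : pvFD), (.empty : pvFD), (.empty : pvFD))
               | none => ((.empty : pvFD), (.empty : pvFD), (.empty : pvFD), (.empty : pvFD))) := by
          simp only [getCDDGItem, hpre, if_true]
        simp only [hpre, if_true]
        exact ⟨hA.symm, pvInv_insert hm hA.symm⟩
      · simp only [hpre, if_false]
        cases hdd : (PySem.Dict.mk DDG).get? t with
        | none =>
          have hA : getCDDGItem (CDG.length + 1) t CDG DDG fIM = ((.empty : pvFD), (.empty : pvFD), (.empty : pvFD), (.empty : pvFD)) := by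
            simp only [getCDDGItem, hpre, if_false, hdd]
          exact ⟨hA.symm, pvInv_insert hm hA.symm⟩
        | some info =>
          have hcont : (PySem.Dict.mk DDG).contains t = true := by
            rw [PySem.Dict.contains_eq_isSome_get?, hdd]; rfl
          have hstep : ∀ s ∈ (PySem.Dict.mk CDG).getD t [], ∀ memo', pvInv CDG DDG fIM memo' →
              (bGet CDG DDG fIM a s memo').1 = getCDDGItem (CDG.length + 1) s CDG DDG fIM ∧
              pvInv CDG DDG fIM (bGet CDG DDG fIM a s memo').2 := by
            intro s hs memo' hm'
            exact ih (by omega) (pvNext CDG DDG S) hS s (mem_pvNext ht hpre hcont hs) a (by omega) memo' hm'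
          have hfold := bfold_aux CDG DDG fIM info a ((PySem.Dict.mk CDG).getD t []) hstep
            ((PySem.Dict.empty).update (pvTget info "input"), .empty, .empty, .empty) memo hm
          have hA : getCDDGItem (CDG.length + 1) t CDG DDG fIM
              = ((PySem.Dict.mk CDG).getD t []).foldl (fun st s =>
                  let sub := getCDDGItem (CDG.length + 1) s CDG DDG fIM
                  (st.1.update sub.1.items,
                   mergeOutputfiles st.2.1 sub.1 sub.2.1 sub.2.2.1 sub.2.2.2 info,
                   mergeCreatefiles st.2.2.1 sub.1 sub.2.1 sub.2.2.1 sub.2.2.2 info,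
                   mergeDeletefiles st.2.2.2 sub.1 sub.2.1 sub.2.2.1 sub.2.2.2 info))
                  ((PySem.Dict.empty).update (pvTget info "input"), .empty, .empty, .empty) := by
            conv_lhs => simp only [getCDDGItem, hpre, if_false, hdd]
            apply PySem.List.foldl_congr_mem
            intro acc s hs
            rw [fuel_inv CDG DDG fIM k (pvNext CDG DDG S) hS s (mem_pvNext ht hpre hcont hs) CDG.length (CDG.length + 1) (by omega) (by omega)]
          refine ⟨?_, ?_⟩
          · rw [hfold.1, ← hA]
          · exact pvInv_insert hfold.2 (by rw [hfold.1, ← hA])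

-- the top-level loops agree
theorem top_eq (CDG : List (String × List String)) (DDG : List (String × List (String × List (Int × Option Int)))) (fIM : List (String × Int))
    (hiter : (pvNext CDG DDG)^[CDG.length + 1] (CDG.map Prod.fst) = []) :
    ∀ (l : List (String × List String)), (∀ e ∈ l, e.1 ∈ CDG.map Prod.fst) →
    ∀ (out : pvOut) (memo : PySem.Dict String pvItem), pvInv CDG DDG fIM memo →
    (l.foldl (fun (p : PySem.Dict String pvItem × pvOut) entry =>
       let r := bGet CDG DDG fIM (CDG.length + 1) entry.1 p.1
       (r.2, p.2 ++ [(entry.1, pvRow r.1)])) (memo, out)).2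
    = l.foldl (fun acc entry => acc ++ [(entry.1, pvRow (getCDDGItem (CDG.length + 1) entry.1 CDG DDG fIM))]) out := by
  intro l
  induction l with
  | nil => intro _ out memo _; rfl
  | cons e l' ih =>
    intro hmem out memo hm
    obtain ⟨h1, h2⟩ := bGet_eq CDG DDG fIM (CDG.length + 1) (le_refl _) (CDG.map Prod.fst) hiter e.1 (hmem e (by simp)) (CDG.length + 1) (le_refl _) memo hm
    simp only [List.foldl_cons]
    rw [show (bGet CDG DDG fIM (CDG.length + 1) e.1 memo).1 = getCDDGItem (CDG.length + 1) e.1 CDG DDG fIM from h1] -- rewrite the row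
    exact ih (fun x hx => hmem x (List.mem_cons_of_mem _ hx)) _ _ h2

-- ===== VERDICT (by name: the statement is the Claim_ definition above) =====
theorem CDDG_constructor_spec : Claim_equal_CDDG_constructor := by
  intro CDG DDG fIM _ hpre
  obtain ⟨_, _, _, _, _, hiter, _⟩ := hpre
  unfold Spec_CDDG_constructor CDDG_constructor CDDG_constructor_alt
  exact (top_eq CDG DDG fIM hiter CDG (fun e he => List.mem_map.mpr ⟨e, he, rfl⟩) [] PySem.Dict.empty (pvInv_empty CDG DDG fIM)).symm
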